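-- pv_equiv track=rewrite | github.com/TanguyBod/AoC2024 | J7/J7.py | allPossibilities2
-- ===== SOURCE A (Python) =====
-- def allPossibilities2(equation):
--     possibilities = []
--     if (len(equation) == 2):
--         return [equation[0]+equation[1], equation[0]*equation[1], int(str(equation[1])+str(equation[0]))]
--     else :
--         possibilitiesRecursion = allPossibilities2(equation[1:])
--         for possibility in possibilitiesRecursion:
--             possibilities.append(equation[0] + possibility)
--             possibilities.append(equation[0] * possibility)
--             possibilities.append(int(str(possibility) + str(equation[0])))
--     return possibilities
-- ===== SOURCE B (Python) =====
-- def allPossibilities2(equation):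
--     a, b = equation[-2], equation[-1]
--     possibilities = [a + b, a * b, int(str(b) + str(a))]
--     for i in range(len(equation) - 3, -1, -1):
--         head = equation[i]
--         possibilities = [v for p in possibilities
--                            for v in (head + p, head * p, int(str(p) + str(head)))]
--     return possibilities
-- ===== Notes on version B (the rewrite author's own statement) =====
-- stated objective: simpler
-- what changed: Replaced A's head recursion (recurse on equation[1:], then append-loop) by an iterative right-to-left pass: start from the last two elements and fold each earlier element into the possibilities list with a flat comprehension, no recursion and no repeated list slicing.
import Mathlib
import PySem

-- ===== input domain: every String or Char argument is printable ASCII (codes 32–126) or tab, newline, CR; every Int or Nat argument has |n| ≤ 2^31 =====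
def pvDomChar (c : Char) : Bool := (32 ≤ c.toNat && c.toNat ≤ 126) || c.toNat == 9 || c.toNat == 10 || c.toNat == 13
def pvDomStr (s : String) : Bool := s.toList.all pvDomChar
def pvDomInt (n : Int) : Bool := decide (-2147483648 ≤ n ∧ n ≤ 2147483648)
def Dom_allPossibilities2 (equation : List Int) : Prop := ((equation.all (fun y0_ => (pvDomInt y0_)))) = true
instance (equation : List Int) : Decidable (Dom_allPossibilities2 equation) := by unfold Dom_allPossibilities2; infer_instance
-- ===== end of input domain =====

-- B replaces A's recursion on equation[1:] by a single iterative right-to-left fold (objective: simpler).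

-- shared helper: int(str(p) + str(h)) — exact PySem port of the digit concatenation
-- (getD 0 is unreachable inside Pre_, where every concatenated suffix is a nonnegative head)
def pvCat (p h : Int) : Int :=
  (PySem.Int.ofStr? (PySem.Int.toStr p ++ PySem.Int.toStr h)).getD 0

-- ===== PORT A =====
def allPossibilities2 : List Int → List Int
  | [a, b] => [a + b, a * b, pvCat b a]
  | a :: rest@(_ :: _ :: _) =>
      (allPossibilities2 rest).foldl (fun poss p => poss ++ [a + p, a * p, pvCat p a]) []
  | _ => []   -- Python recurses forever here (len < 2); excluded by Pre_

-- ===== PORT B =====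
def allPossibilities2_alt (equation : List Int) : List Int :=
  match PySem.List.pyGet? equation (-2), PySem.List.pyGet? equation (-1) with
  | some a, some b =>
      (PySem.List.pyRange ((equation.length : Int) - 3) (-1) (-1)).foldl
        (fun poss i =>
          let head := (PySem.List.pyGet? equation i).getD 0
          poss.flatMap (fun p => [head + p, head * p, pvCat p head]))
        [a + b, a * b, pvCat b a]
  | _, _ => []   -- Python raises IndexError here (len < 2); excluded by Pre_

-- ===== PRECONDITION & SPEC =====
-- Pre_ excludes exactly the inputs where A raises: len < 2 (infinite recursion → RecursionError)
-- and any negative element before the last one (int(str(p) + str(head)) → ValueError).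
def Pre_allPossibilities2 (equation : List Int) : Prop :=
  2 ≤ equation.length ∧ ∀ x ∈ equation.dropLast, 0 ≤ x
instance (equation : List Int) : Decidable (Pre_allPossibilities2 equation) := by
  unfold Pre_allPossibilities2; infer_instance

def pvWitness_allPossibilities2 : List Int := [3, 2]

def Spec_allPossibilities2 (equation : List Int) (out : List Int) : Prop := out = allPossibilities2_alt equation
instance (equation : List Int) (out : List Int) : Decidable (Spec_allPossibilities2 equation out) := by unfold Spec_allPossibilities2; infer_instance

-- ===== CLAIM (what is proved, stated in full; the proofs are below) =====
def Claim_equal_allPossibilities2 : Prop := ∀ (equation : List Int), Dom_allPossibilities2 equation → Pre_allPossibilities2 equation → Spec_allPossibilities2 equation (allPossibilities2 equation)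

-- ===== LEMMAS AND PROOFS =====

-- reference recursion: what both programs compute on lists of length ≥ 2
def pvG : List Int → List Int
  | [a, b] => [a + b, a * b, pvCat b a]
  | a :: rest@(_ :: _ :: _) => (pvG rest).flatMap (fun p => [a + p, a * p, pvCat p a])
  | _ => []

lemma a_eq_pvG (eq : List Int) : allPossibilities2 eq = pvG eq := by
  induction eq with
  | nil => simp [allPossibilities2, pvG]
  | cons a rest ih =>
    match rest with
    | [] => simp [allPossibilities2, pvG]
    | [b] => simp [allPossibilities2, pvG]
    | b :: c :: t =>
      rw [allPossibilities2, pvG, ih, PySem.List.foldl_append_eq_flatMap]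
      simp

lemma pyGet?_cons_negk (x : Int) (xs : List Int) (k : Nat) (h1 : 0 < k) (h2 : k ≤ xs.length) :
    PySem.List.pyGet? (x :: xs) (-(k:Int)) = PySem.List.pyGet? xs (-(k:Int)) := by
  rw [PySem.List.pyGet?_neg_natCast _ _ h1 (by simp; omega),
      PySem.List.pyGet?_neg_natCast _ _ h1 h2]
  have hl : (x :: xs).length - k = (xs.length - k) + 1 := by simp; omega
  rw [hl, List.getElem?_cons_succ]

lemma alt_eq_pvG (eq : List Int) (h : 2 ≤ eq.length) : allPossibilities2_alt eq = pvG eq := by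
  induction eq with
  | nil => simp at h
  | cons a rest ih =>
    match rest with
    | [] => simp at h
    | [b] =>
      simp [allPossibilities2_alt, pvG, PySem.List.pyGet?, PySem.List.pyIdx?,
            PySem.List.pyRange_neg_one_eq_nil]
    | b :: c :: t =>
      set rest := b :: c :: t with hrest
      have hn : 2 ≤ rest.length := by simp [hrest]
      have ih' : allPossibilities2_alt rest = pvG rest := ih hn
      have hm2 : PySem.List.pyGet? (a :: rest) (-2) = PySem.List.pyGet? rest (-2) := by
        have := pyGet?_cons_negk a rest 2 (by omega) hn
        norm_num at this ⊢; exact this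
      have hm1 : PySem.List.pyGet? (a :: rest) (-1) = PySem.List.pyGet? rest (-1) := by
        have := pyGet?_cons_negk a rest 1 (by omega) (by omega)
        norm_num at this ⊢; exact this
      obtain ⟨a2, ha2⟩ : ∃ v, PySem.List.pyGet? rest (-2) = some v := by
        rcases hv : PySem.List.pyGet? rest (-2) with _ | v
        · rw [PySem.List.pyGet?_eq_none_iff] at hv
          exact absurd ⟨by omega, by omega⟩ hv
        · exact ⟨v, rfl⟩
      obtain ⟨b2, hb2⟩ : ∃ v, PySem.List.pyGet? rest (-1) = some v := by
        rcases hv : PySem.List.pyGet? rest (-1) with _ | v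
        · rw [PySem.List.pyGet?_eq_none_iff] at hv
          exact absurd ⟨by omega, by omega⟩ hv
        · exact ⟨v, rfl⟩
      rw [pvG, ← ih']
      simp only [allPossibilities2_alt, hm2, hm1, ha2, hb2]
      have hlen : ((a :: rest).length : Int) - 3 = (rest.length : Int) - 2 := by
        simp; omega
      have hn2 : (0:Int) < (rest.length : Int) - 1 := by
        have := hn; omega
      have hR1 : PySem.List.pyRange ((rest.length : Int) - 2) (-1) (-1)
          = (PySem.List.pyRange 1 ((rest.length : Int) - 1) 1).reverse ++ [0] := by
        rw [PySem.List.pyRange_neg_one_eq_reverse]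
        norm_num
        rw [show ((rest.length : Int)) - 2 + 1 = (rest.length : Int) - 1 by ring,
            PySem.List.pyRange_one_cons hn2]
        norm_num
      have hR2 : PySem.List.pyRange ((rest.length : Int) - 3) (-1) (-1)
          = (PySem.List.pyRange 0 ((rest.length : Int) - 2) 1).reverse := by
        rw [PySem.List.pyRange_neg_one_eq_reverse]
        norm_num
        rw [show ((rest.length : Int)) - 3 + 1 = (rest.length : Int) - 2 by ring]
      rw [hlen, hR1, hR2, List.foldl_append]
      simp only [List.foldl_cons, List.foldl_nil, PySem.List.pyGet?_zero_cons, Option.getD_some]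
      congr 1
      rw [PySem.List.pyRange_one 1 ((rest.length:Int)-1), PySem.List.pyRange_one 0 ((rest.length:Int)-2),
          show ((rest.length:Int)-1-1) = (rest.length:Int)-2-0 by ring,
          ← List.map_reverse, ← List.map_reverse, List.foldl_map, List.foldl_map]
      congr 1
      funext poss k
      have hsh : PySem.List.pyGet? (a :: rest) (1 + (k:Int)) = PySem.List.pyGet? rest (k:Int) := by
        rw [add_comm]
        exact PySem.List.pyGet?_cons_succ a rest k
      rw [hsh]
      norm_num

-- ===== VERDICT (by name: the statement is the Claim_ definition above) =====
theorem allPossibilities2_spec : Claim_equal_allPossibilities2 := by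
  intro eq _ hpre
  unfold Spec_allPossibilities2
  rw [a_eq_pvG, alt_eq_pvG eq hpre.1]
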